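-- pv_equiv track=rewrite | github.com/Yuki708/Blockchain_Traceability | fake_data_detector.py | _calculate_frequency_distance
-- ===== SOURCE A (Python) =====
-- def _calculate_frequency_distance(freq1, freq2):
--     all_commands = set(freq1.keys()) | set(freq2.keys())
--     distance = 0
--     for cmd in all_commands:
--         count1 = freq1.get(cmd, 0)
--         count2 = freq2.get(cmd, 0)
--         distance += abs(count1 - count2)
--     return distance
-- ===== SOURCE B (Python) =====
-- def _calculate_frequency_distance(freq1, freq2):
--     distance = sum(abs(v - freq2.get(k, 0)) for k, v in freq1.items())
--     distance += sum(abs(v) for k, v in freq2.items() if k not in freq1)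
--     return distance
-- ===== Notes on version B (the rewrite author's own statement) =====
-- stated objective: simpler
-- what changed: Replaces the key-union set and the symmetric .get/.get loop by two asymmetric passes: one over freq1's items against freq2, plus one over freq2's items whose keys are absent from freq1; no union set is ever built.
import Mathlib
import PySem

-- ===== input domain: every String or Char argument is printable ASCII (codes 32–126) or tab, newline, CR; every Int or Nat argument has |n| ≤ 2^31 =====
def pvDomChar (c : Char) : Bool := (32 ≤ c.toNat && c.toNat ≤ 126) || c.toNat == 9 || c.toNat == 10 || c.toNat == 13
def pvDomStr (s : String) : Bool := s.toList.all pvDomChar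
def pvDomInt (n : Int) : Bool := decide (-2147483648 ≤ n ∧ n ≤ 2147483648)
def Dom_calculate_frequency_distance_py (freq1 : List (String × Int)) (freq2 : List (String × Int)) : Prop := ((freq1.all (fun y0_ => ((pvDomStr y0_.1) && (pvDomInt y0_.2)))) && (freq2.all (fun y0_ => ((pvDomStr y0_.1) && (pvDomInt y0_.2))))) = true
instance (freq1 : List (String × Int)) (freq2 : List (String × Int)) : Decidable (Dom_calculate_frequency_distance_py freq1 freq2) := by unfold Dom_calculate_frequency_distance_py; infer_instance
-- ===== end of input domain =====

-- B replaces A's key-union set and symmetric .get loop by two asymmetric passes (freq1's items, then freq2's items with keys absent from freq1); objective: simpler.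


-- ===== PORT A =====
def calculate_frequency_distance_py (freq1 : List (String × Int)) (freq2 : List (String × Int)) : Int :=
  let all_commands : PySem.Set String :=
    PySem.Set.union (PySem.Set.ofList (PySem.Dict.keys (PySem.Dict.mk freq1)))
                    (PySem.Set.ofList (PySem.Dict.keys (PySem.Dict.mk freq2)))
  all_commands.foldl
    (fun distance cmd =>
      let count1 := PySem.Dict.getD (PySem.Dict.mk freq1) cmd 0
      let count2 := PySem.Dict.getD (PySem.Dict.mk freq2) cmd 0
      distance + |count1 - count2|) 0

-- ===== PORT B =====
def calculate_frequency_distance_py_alt (freq1 : List (String × Int)) (freq2 : List (String × Int)) : Int :=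
  let distance :=
    ((PySem.Dict.mk freq1).items.map
      (fun p => |p.2 - PySem.Dict.getD (PySem.Dict.mk freq2) p.1 0|)).sum
  distance +
    (((PySem.Dict.mk freq2).items.filter
        (fun p => !(PySem.Dict.contains (PySem.Dict.mk freq1) p.1))).map
      (fun p => |p.2|)).sum

-- ===== PRECONDITION & SPEC =====
-- The parameters are Python dicts, whose keys are necessarily distinct; Pre_ excludes only
-- association lists with a repeated key, which represent no Python input (A raises nothing —
-- such lists simply cannot reach it), so no input A returns on is excluded.
def Pre_calculate_frequency_distance_py (freq1 : List (String × Int)) (freq2 : List (String × Int)) : Prop :=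
  (freq1.map Prod.fst).Nodup ∧ (freq2.map Prod.fst).Nodup
instance (freq1 : List (String × Int)) (freq2 : List (String × Int)) : Decidable (Pre_calculate_frequency_distance_py freq1 freq2) := by unfold Pre_calculate_frequency_distance_py; infer_instance

def pvWitness_calculate_frequency_distance_py : (List (String × Int)) × (List (String × Int)) :=
  ([("ls", 3), ("cd", 1)], [("ls", 1), ("rm", 2)])

def Spec_calculate_frequency_distance_py (freq1 : List (String × Int)) (freq2 : List (String × Int)) (out : Int) : Prop := out = calculate_frequency_distance_py_alt freq1 freq2
instance (freq1 : List (String × Int)) (freq2 : List (String × Int)) (out : Int) : Decidable (Spec_calculate_frequency_distance_py freq1 freq2 out) := by unfold Spec_calculate_frequency_distance_py; infer_instance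

-- ===== CLAIM (what is proved, stated in full; the proofs are below) =====
def Claim_equal_calculate_frequency_distance_py : Prop := ∀ (freq1 : List (String × Int)) (freq2 : List (String × Int)), Dom_calculate_frequency_distance_py freq1 freq2 → Pre_calculate_frequency_distance_py freq1 freq2 → Spec_calculate_frequency_distance_py freq1 freq2 (calculate_frequency_distance_py freq1 freq2)

-- ===== LEMMAS AND PROOFS =====

theorem calculate_frequency_distance_py_eq (freq1 freq2 : List (String × Int))
    (h1 : (freq1.map Prod.fst).Nodup) (h2 : (freq2.map Prod.fst).Nodup) :
    calculate_frequency_distance_py freq1 freq2 = calculate_frequency_distance_py_alt freq1 freq2 := by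
  have hk1 : (PySem.Dict.mk freq1).keys = freq1.map Prod.fst := rfl
  have hk2 : (PySem.Dict.mk freq2).keys = freq2.map Prod.fst := rfl
  set g1 : String → Int := fun k => PySem.Dict.getD (PySem.Dict.mk freq1) k 0 with hg1
  set g2 : String → Int := fun k => PySem.Dict.getD (PySem.Dict.mk freq2) k 0 with hg2
  set f : String → Int := fun k => |g1 k - g2 k| with hf
  set q : String → Bool := fun k => !(PySem.Dict.contains (PySem.Dict.mk freq1) k) with hq
  set K1 := freq1.map Prod.fst with hK1
  set K2 := freq2.map Prod.fst with hK2
  set S : PySem.Set String :=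
    PySem.Set.union (PySem.Set.ofList K1) (PySem.Set.ofList K2) with hS
  have hA : calculate_frequency_distance_py freq1 freq2 = (S.map f).sum := by
    show List.foldl (fun acc k => acc + f k) 0 S = (S.map f).sum
    rw [PySem.List.foldl_add]; ring
  set T : List String := K1 ++ K2.filter q with hT
  have hcont : ∀ k, (PySem.Dict.contains (PySem.Dict.mk freq1) k = true) ↔ k ∈ K1 := by
    intro k; rw [PySem.Dict.contains_iff_mem_keys, hk1]
  have hSnodup : S.Nodup :=
    PySem.Set.nodup_union _ _ (PySem.Set.nodup_ofList _)
  have hTnodup : T.Nodup := by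
    refine List.Nodup.append h1 (h2.filter q) ?_
    intro a ha hb
    have := List.of_mem_filter hb
    rw [hq] at this
    simp only [Bool.not_eq_true'] at this
    exact absurd ((hcont a).mpr ha) (by simp [this])
  have hperm : S.Perm T := by
    rw [List.perm_ext_iff_of_nodup hSnodup hTnodup]
    intro a
    constructor
    · intro hmem
      rcases (PySem.Set.mem_union _ _ _).mp hmem with h | h
      · exact List.mem_append_left _ ((PySem.Set.mem_ofList _ _).mp h)
      · have h2m := (PySem.Set.mem_ofList _ _).mp h
        by_cases hin : a ∈ K1
        · exact List.mem_append_left _ hin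
        · refine List.mem_append_right _ (List.mem_filter.mpr ⟨h2m, ?_⟩)
          rw [hq]
          simp only [Bool.not_eq_true']
          rw [← Bool.not_eq_true]
          exact fun hc => hin ((hcont a).mp hc)
    · intro hmem
      rcases List.mem_append.mp hmem with h | h
      · exact (PySem.Set.mem_union _ _ _).mpr (Or.inl ((PySem.Set.mem_ofList _ _).mpr h))
      · exact (PySem.Set.mem_union _ _ _).mpr (Or.inr ((PySem.Set.mem_ofList _ _).mpr (List.mem_filter.mp h).1))
  have hsum : (S.map f).sum = (T.map f).sum := (hperm.map f).sum_eq
  have hpart1 : (K1.map f) = freq1.map (fun p => |p.2 - g2 p.1|) := by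
    rw [hK1, List.map_map]
    refine List.map_congr_left ?_
    intro p hp
    have : g1 p.1 = p.2 := by
      rw [hg1]
      exact PySem.Dict.getD_of_mem_items (PySem.Dict.mk freq1)
        (by simpa using hp) h1 0
    simp [Function.comp, hf, this]
  have hpart2 : ((K2.filter q).map f) = (freq2.filter (fun p => q p.1)).map (fun p => |p.2|) := by
    rw [hK2, List.filter_map, List.map_map]
    refine List.map_congr_left ?_
    intro p hp
    have hpm := List.mem_filter.mp hp
    have hqp : q p.1 = true := by simpa [Function.comp] using hpm.2
    have hg1p : g1 p.1 = 0 := by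
      rw [hg1]
      refine PySem.Dict.getD_of_not_contains _ _ ?_
      rw [hq] at hqp
      simpa using hqp
    have hg2p : g2 p.1 = p.2 := by
      rw [hg2]
      exact PySem.Dict.getD_of_mem_items (PySem.Dict.mk freq2)
        (by simpa using hpm.1) h2 0
    simp [Function.comp, hf, hg1p, hg2p]
  have hB : calculate_frequency_distance_py_alt freq1 freq2 =
      (freq1.map (fun p => |p.2 - g2 p.1|)).sum + ((freq2.filter (fun p => q p.1)).map (fun p => |p.2|)).sum := rfl
  rw [hA, hsum, hT, List.map_append, List.sum_append, hpart1, hpart2, hB]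

-- ===== VERDICT (by name: the statement is the Claim_ definition above) =====
theorem calculate_frequency_distance_py_spec : Claim_equal_calculate_frequency_distance_py := by
  intro freq1 freq2 _ hpre
  exact calculate_frequency_distance_py_eq freq1 freq2 hpre.1 hpre.2
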